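-- pv_equiv track=rewrite | github.com/lessoued-amira/compilation | compilation (1) (1).py | comment_spaces
-- ===== SOURCE A (Python) =====
-- def comment_spaces(s):
--     i = 0
--     a = 0
--     s = list(s)
--     while (i < len(s)):
--         if a == 0:
--             if s[i] == "$":
--                 a = 1
--                 x = i
--             i += 1
--             continue
--         if a == 1:
--             if s[i] == "$":
--                 a = 0
--                 y = i + 1
--                 for j in range(x, y, 1):
--                     s[j] = " "
--             i += 1
--     if a == 1:
--         for j in range(x, len(s), 1):
--             s[j] = " "
--     s = "".join(s)
--     #Remove spaces
--     s=" ".join(s.split())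
--     return s
-- ===== SOURCE B (Python) =====
-- def comment_spaces(s):
--     parts = s.split('$')
--     kept = " ".join(parts[0::2])
--     return " ".join(kept.split())
-- ===== Notes on version B (the rewrite author's own statement) =====
-- stated objective: simpler
-- what changed: Replaces A's two-state index-tracking scan that blanks dollar-comment regions in place with a split on the dollar sign that keeps the even-indexed (outside) parts joined by single spaces; the final whitespace collapse absorbs the spacing difference.
import Mathlib
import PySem

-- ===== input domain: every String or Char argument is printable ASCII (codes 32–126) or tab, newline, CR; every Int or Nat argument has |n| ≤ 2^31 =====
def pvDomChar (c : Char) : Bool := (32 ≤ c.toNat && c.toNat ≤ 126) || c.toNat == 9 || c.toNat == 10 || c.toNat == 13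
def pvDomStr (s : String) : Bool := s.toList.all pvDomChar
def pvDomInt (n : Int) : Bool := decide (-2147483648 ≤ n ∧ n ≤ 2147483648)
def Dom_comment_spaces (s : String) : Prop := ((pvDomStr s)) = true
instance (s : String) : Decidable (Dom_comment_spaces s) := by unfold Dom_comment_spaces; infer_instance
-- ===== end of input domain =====

-- B replaces A's two-state in-place blanking scan by a split on the dollar sign keeping the even-indexed parts joined with single spaces (simpler; C-level split instead of a per-char Python loop).

-- ===== PORT A =====
-- `for j in range(x, y, 1): s[j] = " "` — all indices used are nonnegative, so `j.toNat` is exact here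
def csBlank (s : List Char) (x y : Nat) : List Char :=
  (PySem.List.pyRange x y 1).foldl (fun t j => t.set j.toNat ' ') s

theorem csBlank_length (s : List Char) (x y : Nat) : (csBlank s x y).length = s.length := by
  unfold csBlank
  generalize PySem.List.pyRange (x : Int) (y : Int) 1 = r
  induction r generalizing s with
  | nil => rfl
  | cons j r ih => simpa using ih (s.set j.toNat ' ')

-- the while loop of A: i is the cursor, a the state, x the opening position; returns (list, a, x)
def csLoop (s : List Char) (i a x : Nat) : List Char × Nat × Nat :=
  if h : i < s.length then
    if a = 0 then
      if s[i]'h = '$' then csLoop s (i+1) 1 i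
      else csLoop s (i+1) 0 x
    else
      if s[i]'h = '$' then csLoop (csBlank s x (i+1)) (i+1) 0 x
      else csLoop s (i+1) a x
  else (s, a, x)
termination_by s.length - i
decreasing_by all_goals first
  | omega
  | (rw [csBlank_length]; omega)

def comment_spaces (s : String) : String :=
  let l := s.toList
  let r := csLoop l 0 0 0
  let l2 := if r.2.1 = 1 then csBlank r.1 r.2.2 r.1.length else r.1
  String.mk (PySem.Chars.join [' '] (PySem.Chars.split₀ l2))

-- ===== PORT B =====
-- hand port of `parts[0::2]` (the step-2 slice from index 0); exact: keeps exactly the even-indexed elements in order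
def csEvens : List (List Char) → List (List Char)
  | [] => []
  | [p] => [p]
  | p :: _ :: rest => p :: csEvens rest

def comment_spaces_alt (s : String) : String :=
  let parts := PySem.Chars.splitOn s.toList ['$']
  let kept := PySem.Chars.join [' '] (csEvens parts)
  String.mk (PySem.Chars.join [' '] (PySem.Chars.split₀ kept))

-- ===== PRECONDITION & SPEC =====
def Spec_comment_spaces (s : String) (out : String) : Prop := out = comment_spaces_alt s
instance (s : String) (out : String) : Decidable (Spec_comment_spaces s out) := by unfold Spec_comment_spaces; infer_instance

-- ===== CLAIM (what is proved, stated in full; the proofs are below) =====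
def Claim_equal_comment_spaces : Prop := ∀ (s : String), Dom_comment_spaces s → Spec_comment_spaces s (comment_spaces s)

-- ===== LEMMAS AND PROOFS =====

-- denotational model of A's scan: pvFg false _ = outside a region, pvFg true m = inside, m chars of region seen
def pvFg : Bool → Nat → List Char → List Char
  | false, _, [] => []
  | false, _, c :: t => if c = '$' then pvFg true 1 t else c :: pvFg false 0 t
  | true, m, [] => List.replicate m ' '
  | true, m, c :: t => if c = '$' then List.replicate (m+1) ' ' ++ pvFg false 0 t else pvFg true (m+1) t

-- plain recursive model of split on '$'
def pvSplit : List Char → List (List Char)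
  | [] => [[]]
  | c :: t =>
    if c = '$' then [] :: pvSplit t
    else match pvSplit t with
      | p :: ps => (c :: p) :: ps
      | [] => [[c]]

-- plain recursive model of str.split() with the current (reversed) word as accumulator
def pvWords : List Char → List Char → List (List Char)
  | [], cur => if cur.isEmpty then [] else [cur.reverse]
  | c :: t, cur =>
    if PySem.Chars.isspace c then
      (if cur.isEmpty then pvWords t [] else cur.reverse :: pvWords t [])
    else pvWords t (c :: cur)

theorem split₀_go_eq (l : List Char) : ∀ cur acc,
    PySem.Chars.split₀.go l cur acc = acc.reverse ++ pvWords l cur := by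
  induction l with
  | nil => intro cur acc; simp [PySem.Chars.split₀.go, pvWords]; split_ifs <;> simp
  | cons c t ih =>
    intro cur acc
    simp only [PySem.Chars.split₀.go, pvWords]
    split_ifs <;> simp [ih]

theorem split₀_eq (l : List Char) : PySem.Chars.split₀ l = pvWords l [] := by
  simp [PySem.Chars.split₀, split₀_go_eq]

theorem pvSplit_ne_nil (l : List Char) : pvSplit l ≠ [] := by
  cases l with
  | nil => simp [pvSplit]
  | cons c t =>
    simp only [pvSplit]
    split_ifs
    · simp
    · cases h : pvSplit t <;> simp

theorem splitOn_go_eq : ∀ (fuel : Nat) (l cur : List Char) (acc : List (List Char)),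
    l.length < fuel →
    PySem.Chars.splitOn.go ['$'] fuel l cur acc =
      acc.reverse ++ (match pvSplit l with
        | p :: ps => (cur.reverse ++ p) :: ps
        | [] => []) := by
  intro fuel
  induction fuel with
  | zero => intro l cur acc h; omega
  | succ k ih =>
    intro l cur acc h
    cases l with
    | nil => simp [PySem.Chars.splitOn.go, pvSplit]
    | cons c t =>
      simp only [PySem.Chars.splitOn.go]
      by_cases hc : c = '$'
      · subst hc
        rw [if_pos (by simp [List.isPrefixOf])]
        rw [show List.drop (['$'] : List Char).length ('$' :: t) = t from rfl]
        rw [ih t [] (cur.reverse :: acc) (by simpa using Nat.lt_of_succ_lt_succ h)]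
        have hne := pvSplit_ne_nil t
        cases hp : pvSplit t with
        | nil => exact absurd hp hne
        | cons p ps => simp [pvSplit, hp]
      · rw [if_neg (by simp [List.isPrefixOf]; exact fun hh => hc hh.symm)]
        rw [ih t (c :: cur) acc (by simpa using Nat.lt_of_succ_lt_succ h)]
        have hne := pvSplit_ne_nil t
        cases hp : pvSplit t with
        | nil => exact absurd hp hne
        | cons p ps => simp [pvSplit, hp, hc]

theorem splitOn_eq (l : List Char) : PySem.Chars.splitOn l ['$'] = pvSplit l := by
  have h := splitOn_go_eq (l.length + 1) l [] [] (by omega)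
  have hne := pvSplit_ne_nil l
  cases hp : pvSplit l with
  | nil => exact absurd hp hne
  | cons p ps => simpa [PySem.Chars.splitOn, hp] using h

theorem csBlank_eq (k : Nat) : ∀ (s : List Char) (x : Nat), x + k ≤ s.length →
    csBlank s x (x + k) = s.take x ++ List.replicate k ' ' ++ s.drop (x + k) := by
  induction k with
  | zero =>
    intro s x h
    have hnil : PySem.List.pyRange (x : Int) (x : Int) = [] := by
      have happ := PySem.List.pyRange_one_append (x : Int) (x : Int) (x : Int) le_rfl le_rfl
      have hlen := congrArg List.length happ
      simp only [List.length_append] at hlen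
      exact List.eq_nil_of_length_eq_zero (by omega)
    simp [csBlank, hnil, List.take_append_drop]
  | succ k ih =>
    intro s x h
    have hx : x < s.length := by omega
    have hstep : csBlank s x (x + (k+1)) = csBlank (s.set x ' ') (x+1) (x + (k+1)) := by
      simp only [csBlank]
      rw [PySem.List.pyRange_one_cons (a := (x : Int)) (b := ((x + (k+1) : Nat) : Int)) (by push_cast; omega)]
      simp only [List.foldl_cons, Int.toNat_natCast]
      norm_cast
    rw [hstep, show x + (k+1) = (x+1) + k by ring,
      ih (s.set x ' ') (x+1) (by simp; omega)]
    have htake : (s.set x ' ').take (x+1) = s.take x ++ [' '] := by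
      rw [List.take_set]
      rw [List.take_succ_eq_append_getElem (by omega)]
      rw [List.set_append]
      simp [List.length_take, Nat.min_eq_left (le_of_lt hx)]
    have hdrop : (s.set x ' ').drop (x+1+k) = s.drop (x+1+k) := by
      rw [List.drop_set]
      simp [Nat.lt_of_lt_of_le (Nat.lt_succ_self x) (by omega : x+1 ≤ x+1+k)]
    rw [htake, hdrop, List.replicate_succ]
    simp

-- loop characterization: postA finishes the pending blank
def postA (r : List Char × Nat × Nat) : List Char :=
  if r.2.1 = 1 then csBlank r.1 r.2.2 r.1.length else r.1

theorem loop_main : ∀ (n : Nat) (todo : List Char), todo.length = n →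
    (∀ (done : List Char) (x0 : Nat),
      postA (csLoop (done ++ todo) done.length 0 x0) = done ++ pvFg false 0 todo) ∧
    (∀ (done mid : List Char),
      postA (csLoop (done ++ (mid ++ todo)) (done.length + mid.length) 1 done.length)
        = done ++ pvFg true mid.length todo) := by
  intro n
  induction n with
  | zero =>
    intro todo h
    have ht : todo = [] := List.eq_nil_of_length_eq_zero h
    subst ht
    constructor
    · intro done x0
      rw [csLoop, dif_neg (by simp)]
      simp [postA, pvFg]
    · intro done mid
      rw [csLoop, dif_neg (by simp)]
      have hb : csBlank (done ++ mid) done.length (done.length + mid.length)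
          = done ++ List.replicate mid.length ' ' := by
        rw [csBlank_eq mid.length (done ++ mid) done.length (by simp)]
        simp
      simp [postA, pvFg, hb]
  | succ k ih =>
    intro todo h
    cases todo with
    | nil => simp at h
    | cons c t =>
      have ht : t.length = k := by simpa using h
      constructor
      · intro done x0
        have hi : done.length < (done ++ c :: t).length := by
          simp only [List.length_append, List.length_cons]; omega
        have hget : (done ++ c :: t)[done.length]'hi = c := by
          rw [List.getElem_append_right (by omega)]
          simp
        rw [csLoop, dif_pos hi, if_pos rfl]
        simp only [hget]
        by_cases hc : c = '$'
        · subst hc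
          rw [if_pos rfl]
          have h2 := (ih t ht).2 done ['$']
          rw [show ((['$'] : List Char).length : Nat) = 1 from rfl] at h2
          rw [show (['$'] ++ t : List Char) = '$' :: t from rfl] at h2
          rw [h2]
          simp [pvFg]
        · rw [if_neg hc]
          have h1 := (ih t ht).1 (done ++ [c]) x0
          rw [show ((done ++ [c] : List Char).length : Nat) = done.length + 1 by simp] at h1
          rw [show ((done ++ [c]) ++ t : List Char) = done ++ c :: t by simp] at h1
          rw [h1]
          simp [pvFg, hc]
      · intro done mid
        rw [show (done ++ (mid ++ c :: t) : List Char) = (done ++ mid) ++ c :: t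
          by rw [List.append_assoc]]
        rw [show (done.length + mid.length : Nat) = (done ++ mid).length by simp]
        have hi : (done ++ mid).length < ((done ++ mid) ++ c :: t).length := by
          simp only [List.length_append, List.length_cons]; omega
        have hget : ((done ++ mid) ++ c :: t)[(done ++ mid).length]'hi = c := by
          rw [List.getElem_append_right (by omega)]
          simp
        rw [csLoop, dif_pos hi, if_neg (by decide)]
        simp only [hget]
        by_cases hc : c = '$'
        · subst hc
          rw [if_pos rfl]
          rw [show ((done ++ mid) ++ '$' :: t : List Char) = done ++ (mid ++ '$' :: t)
            by rw [List.append_assoc]]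
          rw [show ((done ++ mid).length + 1 : Nat) = done.length + (mid.length + 1)
            by simp only [List.length_append]; omega]
          have hb : csBlank (done ++ (mid ++ '$' :: t)) done.length (done.length + (mid.length + 1))
              = done ++ (List.replicate (mid.length + 1) ' ' ++ t) := by
            rw [csBlank_eq (mid.length + 1) (done ++ (mid ++ '$' :: t)) done.length
              (by simp only [List.length_append, List.length_cons]; omega)]
            have htake : (done ++ (mid ++ '$' :: t)).take done.length = done := by simp
            have hdrop : (done ++ (mid ++ '$' :: t)).drop (done.length + (mid.length + 1)) = t := by
              rw [show (done ++ (mid ++ '$' :: t) : List Char) = (done ++ mid ++ ['$']) ++ t by simp]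
              rw [List.drop_append_of_le_length (by simp)]
              simp
            rw [htake, hdrop]
            simp
          rw [hb]
          have h1 := (ih t ht).1 (done ++ List.replicate (mid.length + 1) ' ') done.length
          rw [show ((done ++ List.replicate (mid.length + 1) ' ' : List Char).length : Nat)
              = done.length + (mid.length + 1) by simp] at h1
          rw [show ((done ++ List.replicate (mid.length + 1) ' ') ++ t : List Char)
              = done ++ (List.replicate (mid.length + 1) ' ' ++ t) by simp] at h1
          rw [h1]
          simp [pvFg]
        · rw [if_neg hc]
          have h2 := (ih t ht).2 done (mid ++ [c])
          rw [show ((mid ++ [c] : List Char).length : Nat) = mid.length + 1 by simp] at h2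
          rw [show (done ++ ((mid ++ [c]) ++ t) : List Char) = (done ++ mid) ++ c :: t by simp] at h2
          rw [show (done.length + (mid.length + 1) : Nat) = (done ++ mid).length + 1
            by simp only [List.length_append]; omega] at h2
          rw [h2]
          simp [pvFg, hc]

theorem words_cong (r1 r2 : List Char) (h : ∀ cur, pvWords r1 cur = pvWords r2 cur) :
    ∀ (u cur : List Char), pvWords (u ++ r1) cur = pvWords (u ++ r2) cur := by
  intro u
  induction u with
  | nil => intro cur; exact h cur
  | cons c t ih =>
    intro cur
    simp only [List.cons_append, pvWords]
    split_ifs <;> simp [ih]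

theorem words_space_cons (v cur : List Char) :
    pvWords (' ' :: v) cur
      = if cur.isEmpty then pvWords v [] else cur.reverse :: pvWords v [] := by
  simp [pvWords, show PySem.Chars.isspace ' ' = true from rfl]

theorem words_replicate_nil : ∀ (k : Nat) (cur : List Char),
    pvWords (List.replicate k ' ') cur = pvWords [] cur := by
  intro k
  induction k with
  | zero => intro cur; rfl
  | succ k ih =>
    intro cur
    rw [List.replicate_succ, words_space_cons]
    have h0 : pvWords (List.replicate k ' ') [] = [] := by rw [ih]; rfl
    rw [h0]
    simp [pvWords]

theorem words_replicate (k : Nat) (hk : 1 ≤ k) : ∀ (v cur : List Char),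
    pvWords (List.replicate k ' ' ++ v) cur = pvWords (' ' :: v) cur := by
  induction k with
  | zero => omega
  | succ k ih =>
    intro v cur
    rw [List.replicate_succ, List.cons_append, words_space_cons, words_space_cons]
    have hkv : pvWords (List.replicate k ' ' ++ v) [] = pvWords v [] := by
      cases Nat.eq_zero_or_pos k with
      | inl h0 => subst h0; rfl
      | inr h1 => rw [ih h1 v [], words_space_cons]; rfl
    rw [hkv]

theorem join_cons_char (c : Char) (p : List Char) (R : List (List Char)) :
    PySem.Chars.join [' '] ((c :: p) :: R) = c :: PySem.Chars.join [' '] (p :: R) := by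
  cases R with
  | nil => simp [PySem.Chars.join_singleton]
  | cons q rs => simp [PySem.Chars.join_cons_cons]

theorem evens_cons (a : List Char) (r : List (List Char)) :
    csEvens (a :: r) = a :: csEvens r.tail := by
  cases r <;> rfl

theorem csEvens_ne_nil (a : List Char) (r : List (List Char)) : csEvens (a :: r) ≠ [] := by
  rw [evens_cons]; simp

theorem final_w : ∀ (n : Nat) (l : List Char), l.length = n →
    (∀ cur, pvWords (pvFg false 0 l) cur
        = pvWords (PySem.Chars.join [' '] (csEvens (pvSplit l))) cur) ∧
    (∀ (m : Nat) (cur : List Char), 1 ≤ m →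
      pvWords (pvFg true m l) cur =
        if (pvSplit l).tail = [] then pvWords [] cur
        else pvWords (' ' :: PySem.Chars.join [' '] (csEvens (pvSplit l).tail)) cur) := by
  intro n
  induction n with
  | zero =>
    intro l h
    have hl : l = [] := List.eq_nil_of_length_eq_zero h
    subst hl
    constructor
    · intro cur
      simp [pvFg, pvSplit, csEvens, PySem.Chars.join_singleton]
    · intro m cur _
      simp [pvFg, pvSplit, words_replicate_nil]
  | succ k ih =>
    intro l h
    cases l with
    | nil => simp at h
    | cons c t =>
      have ht : t.length = k := by simpa using h
      constructor
      · intro cur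
        by_cases hc : c = '$'
        · subst hc
          have hW2 := (ih t ht).2 1 cur (le_refl 1)
          rw [show pvFg false 0 ('$' :: t) = pvFg true 1 t by simp [pvFg], hW2]
          rw [show pvSplit ('$' :: t) = [] :: pvSplit t by simp [pvSplit]]
          cases hps : pvSplit t with
          | nil => exact absurd hps (pvSplit_ne_nil t)
          | cons p rest =>
            cases rest with
            | nil => simp [csEvens, PySem.Chars.join_singleton, pvWords]
            | cons r rs =>
              rw [List.tail_cons, if_neg (List.cons_ne_nil _ _)]
              rw [show csEvens ([] :: p :: r :: rs) = [] :: csEvens (r :: rs) from rfl]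
              cases he : csEvens (r :: rs) with
              | nil => exact absurd he (csEvens_ne_nil r rs)
              | cons e es =>
                rw [PySem.Chars.join_cons_cons]
                simp
        · have hW1 := (ih t ht).1
          rw [show pvFg false 0 (c :: t) = c :: pvFg false 0 t by simp [pvFg, hc]]
          cases hps : pvSplit t with
          | nil => exact absurd hps (pvSplit_ne_nil t)
          | cons p ps =>
            rw [show pvSplit (c :: t) = (c :: p) :: ps by simp [pvSplit, hc, hps]]
            rw [evens_cons, join_cons_char, ← evens_cons]
            rw [hps] at hW1
            have := words_cong (pvFg false 0 t)
              (PySem.Chars.join [' '] (csEvens (p :: ps))) hW1 [c] cur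
            simpa using this
      · intro m cur hm
        by_cases hc : c = '$'
        · subst hc
          rw [show pvFg true m ('$' :: t) = List.replicate (m+1) ' ' ++ pvFg false 0 t
            by simp [pvFg]]
          rw [words_replicate (m+1) (by omega), words_space_cons]
          rw [show pvSplit ('$' :: t) = [] :: pvSplit t by simp [pvSplit]]
          simp only [List.tail_cons, if_neg (pvSplit_ne_nil t)]
          rw [words_space_cons, (ih t ht).1 []]
        · rw [show pvFg true m (c :: t) = pvFg true (m+1) t by simp [pvFg, hc]]
          rw [(ih t ht).2 (m+1) cur (by omega)]
          cases hps : pvSplit t with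
          | nil => exact absurd hps (pvSplit_ne_nil t)
          | cons p ps =>
            rw [show pvSplit (c :: t) = (c :: p) :: ps by simp [pvSplit, hc, hps]]
            simp

-- ===== VERDICT (by name: the statement is the Claim_ definition above) =====
theorem comment_spaces_spec : Claim_equal_comment_spaces := by
  intro s _
  unfold Spec_comment_spaces
  show comment_spaces s = comment_spaces_alt s
  have hloop := (loop_main s.toList.length s.toList rfl).1 [] 0
  simp only [List.nil_append, List.length_nil] at hloop
  simp only [postA] at hloop
  simp only [comment_spaces, comment_spaces_alt]
  rw [splitOn_eq, hloop, split₀_eq, split₀_eq, (final_w s.toList.length s.toList rfl).1 []]
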